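-- pv_equiv track=rewrite | github.com/Jack-Dewey-Levi/Spell-Checker-Alg | spell_check_alg.py | get_word_to_anylocation_matching_letters_dict
-- ===== SOURCE A (Python) =====
-- def get_word_to_anylocation_matching_letters_dict(user_input_word, words_dictionary_list):
-- 	word_to_anylocation_matching_letters_dict = {}
-- 	# iterate list of all words
-- 	for _word in words_dictionary_list:
-- 		number_of_matching_letters = 0
-- 		# checks how many letters match for that _word
-- 		for c in _word:
-- 			if c in user_input_word:
-- 				number_of_matching_letters+=1
-- 		# appends number of matching letters to word_to_anylocation_matching_letters_dict with _word as key
-- 		word_to_anylocation_matching_letters_dict[_word] = number_of_matching_letters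
--
-- 	return word_to_anylocation_matching_letters_dict
-- ===== SOURCE B (Python) =====
-- def get_word_to_anylocation_matching_letters_dict(user_input_word, words_dictionary_list):
--     input_set = set(user_input_word)
--     result = {}
--     for _word in words_dictionary_list:
--         freq = {}
--         for ch in _word:
--             freq[ch] = freq.get(ch, 0) + 1
--         result[_word] = sum(cnt for ch, cnt in freq.items() if ch in input_set)
--     return result
-- ===== Notes on version B (the rewrite author's own statement) =====
-- stated objective: alternative
-- what changed: B precomputes set(user_input_word) once and, per word, builds a character frequency table and sums the counts of the distinct letters that lie in the input set, instead of testing each character occurrence against the input string.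
import Mathlib
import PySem

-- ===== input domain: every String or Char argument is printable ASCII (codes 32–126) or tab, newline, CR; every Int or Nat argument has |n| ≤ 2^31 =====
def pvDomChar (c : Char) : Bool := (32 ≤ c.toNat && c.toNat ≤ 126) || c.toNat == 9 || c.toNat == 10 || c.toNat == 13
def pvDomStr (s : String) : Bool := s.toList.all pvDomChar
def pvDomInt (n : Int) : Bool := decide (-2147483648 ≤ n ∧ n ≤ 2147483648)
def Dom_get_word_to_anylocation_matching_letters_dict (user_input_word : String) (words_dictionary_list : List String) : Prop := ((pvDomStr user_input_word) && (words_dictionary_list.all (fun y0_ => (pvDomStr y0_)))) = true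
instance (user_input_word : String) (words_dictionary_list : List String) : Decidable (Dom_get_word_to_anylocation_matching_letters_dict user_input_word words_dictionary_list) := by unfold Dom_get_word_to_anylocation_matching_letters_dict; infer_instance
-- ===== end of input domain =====

-- B builds a per-word character frequency table and sums counts over the distinct
-- letters present in a precomputed input-character set, instead of testing every
-- occurrence against the input string (objective: alternative decomposition).

-- ===== PORT A =====
def get_word_to_anylocation_matching_letters_dict (user_input_word : String) (words_dictionary_list : List String) : List (String × Int) :=
  (words_dictionary_list.foldl
    (fun d _word =>
      d.insert _word
        (_word.toList.foldl
          (fun number_of_matching_letters c =>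
            if PySem.Chars.isIn [c] user_input_word.toList then number_of_matching_letters + 1
            else number_of_matching_letters)
          (0 : Int)))
    (PySem.Dict.empty : PySem.Dict String Int)).items

-- ===== PORT B =====
def get_word_to_anylocation_matching_letters_dict_alt (user_input_word : String) (words_dictionary_list : List String) : List (String × Int) :=
  let input_set : PySem.Set Char := PySem.Set.ofList user_input_word.toList
  (words_dictionary_list.foldl
    (fun result _word =>
      let freq : PySem.Dict Char Int :=
        _word.toList.foldl (fun d ch => d.insert ch (d.getD ch 0 + 1))
          (PySem.Dict.empty : PySem.Dict Char Int)
      result.insert _word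
        ((freq.items.filter (fun p => PySem.Set.contains input_set p.1)).map Prod.snd).sum)
    (PySem.Dict.empty : PySem.Dict String Int)).items

-- ===== PRECONDITION & SPEC =====
def Spec_get_word_to_anylocation_matching_letters_dict (user_input_word : String) (words_dictionary_list : List String) (out : List (String × Int)) : Prop := out = get_word_to_anylocation_matching_letters_dict_alt user_input_word words_dictionary_list
instance (user_input_word : String) (words_dictionary_list : List String) (out : List (String × Int)) : Decidable (Spec_get_word_to_anylocation_matching_letters_dict user_input_word words_dictionary_list out) := by unfold Spec_get_word_to_anylocation_matching_letters_dict; infer_instance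

-- ===== CLAIM (what is proved, stated in full; the proofs are below) =====
def Claim_equal_get_word_to_anylocation_matching_letters_dict : Prop := ∀ (user_input_word : String) (words_dictionary_list : List String), Dom_get_word_to_anylocation_matching_letters_dict user_input_word words_dictionary_list → Spec_get_word_to_anylocation_matching_letters_dict user_input_word words_dictionary_list (get_word_to_anylocation_matching_letters_dict user_input_word words_dictionary_list)

-- ===== LEMMAS AND PROOFS =====

-- A one-character string is a substring iff the character occurs.
theorem pv_isIn_singleton (c : Char) (l : List Char) :
    PySem.Chars.isIn [c] l = decide (c ∈ l) := by
  by_cases h : c ∈ l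
  · obtain ⟨s, t, rfl⟩ := List.append_of_mem h
    simp [(PySem.Chars.isIn_iff_infix [c] (s ++ c :: t)).mpr ⟨s, t, by simp⟩]
  · simp only [h, decide_false]
    rw [PySem.Chars.isIn_eq_false_iff]
    intro hinf
    exact h (hinf.subset (List.mem_singleton_self c))

-- Sum of an equality indicator over a duplicate-free list.
theorem pv_sum_indicator (m : List Char) (hm : m.Nodup) (x : Char) :
    (m.map (fun k => if x = k then (1 : Int) else 0)).sum = if x ∈ m then 1 else 0 := by
  induction m with
  | nil => simp
  | cons a t ih =>
    simp only [List.nodup_cons] at hm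
    by_cases hx : x = a
    · subst hx
      simp [hm.1, ih hm.2]
    · simp [hx, ih hm.2]

-- Summing per-distinct-character counts over the matching characters equals
-- counting the matching occurrences.
theorem pv_sum_counts (p : Char → Bool) (s : List Char) (hs : s.Nodup)
    (l : List Char) (hsub : ∀ x ∈ l, p x = true → x ∈ s) :
    ((s.filter p).map (fun k => (l.count k : Int))).sum = (l.countP p : Int) := by
  induction l with
  | nil => simp
  | cons x t ih =>
    have hsub' : ∀ y ∈ t, p y = true → y ∈ s := fun y hy => hsub y (List.mem_cons_of_mem x hy)
    have hsplit : ∀ k : Char, ((x :: t).count k : Int)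
        = (t.count k : Int) + (if x = k then 1 else 0) := by
      intro k
      by_cases h : x = k <;> simp [h]
    calc ((s.filter p).map (fun k => ((x :: t).count k : Int))).sum
        = ((s.filter p).map (fun k => (t.count k : Int) + (if x = k then 1 else 0))).sum := by
          exact congrArg List.sum (List.map_congr_left fun k _ => hsplit k)
      _ = ((s.filter p).map (fun k => (t.count k : Int))).sum
            + ((s.filter p).map (fun k => if x = k then (1 : Int) else 0)).sum := by
          rw [← List.sum_map_add]
      _ = (t.countP p : Int) + (if x ∈ s.filter p then 1 else 0) := by
          rw [ih hsub', pv_sum_indicator (s.filter p) (hs.filter p) x]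
      _ = ((x :: t).countP p : Int) := by
          by_cases hp : p x = true
          · have : x ∈ s.filter p := List.mem_filter.mpr ⟨hsub x List.mem_cons_self hp, hp⟩
            simp [hp, this]
          · have : x ∉ s.filter p := fun hmem => hp (List.mem_filter.mp hmem).2
            simp [hp, this]

-- Per-word value of port A equals per-word value of port B.
theorem pv_word_value (u : String) (w : String) :
    w.toList.foldl
        (fun n c => if PySem.Chars.isIn [c] u.toList then n + 1 else n) (0 : Int)
      = ((((w.toList.foldl (fun d ch => d.insert ch (d.getD ch 0 + 1))
            (PySem.Dict.empty : PySem.Dict Char Int)).items.filter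
              (fun p => PySem.Set.contains (PySem.Set.ofList u.toList) p.1)).map Prod.snd).sum) := by
  rw [PySem.Dict.foldl_insert_getD_add_one_eq_counter, PySem.Dict.items_counter]
  rw [List.filter_map, List.map_map]
  have hpred : (fun k : Char => PySem.Set.contains (PySem.Set.ofList u.toList) k)
      = fun k => decide (k ∈ u.toList) := by
    funext k
    by_cases h : k ∈ u.toList
    · simp [PySem.Set.mem_ofList, h]
    · simp only [h, decide_false]
      rw [Bool.eq_false_iff]
      intro hc
      exact h ((PySem.Set.mem_ofList _ _).mp ((PySem.Set.contains_iff _ _).mp hc))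
  have hA : w.toList.foldl
      (fun n c => if PySem.Chars.isIn [c] u.toList then n + 1 else n) (0 : Int)
      = (w.toList.countP (fun c => decide (c ∈ u.toList)) : Int) := by
    have := PySem.List.foldl_if_add_one (fun c => PySem.Chars.isIn [c] u.toList) w.toList (0 : Int)
    rw [this]
    have : (fun c => PySem.Chars.isIn [c] u.toList) = fun c => decide (c ∈ u.toList) := by
      funext c; exact pv_isIn_singleton c u.toList
    simp [this]
  rw [hA]
  have := pv_sum_counts (fun c => decide (c ∈ u.toList))
      (PySem.Set.ofList w.toList) (PySem.Set.nodup_ofList w.toList) w.toList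
      (fun x hx _ => (PySem.Set.mem_ofList _ _).mpr hx)
  rw [← this]
  simp only [hpred]
  rfl

theorem get_word_to_anylocation_matching_letters_dict_spec : Claim_equal_get_word_to_anylocation_matching_letters_dict := by
  intro u words_dictionary_list _
  unfold Spec_get_word_to_anylocation_matching_letters_dict
  unfold get_word_to_anylocation_matching_letters_dict get_word_to_anylocation_matching_letters_dict_alt
  refine congrArg PySem.Dict.items ?_
  refine PySem.List.foldl_congr_mem words_dictionary_list _ _ _ ?_
  intro d w _
  show d.insert w _ = d.insert w _
  rw [pv_word_value u w]
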